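-- pv_equiv track=rewrite | github.com/Time0o/advent-of-code | 2015/day05/day05.py | is_nice2
-- ===== SOURCE A (Python) =====
-- def is_nice2(string: str) -> bool:
--     spaced_double_letter = False
--     double_letter_pair = False
--
--     letter_pairs = {}
--     for i in range(len(string)):
--         if not double_letter_pair and i > 0:
--             cc = string[(i - 1):(i + 1)]
--
--             if cc in letter_pairs:
--                 if letter_pairs[cc] != i - 1:
--                     double_letter_pair = True
--             else:
--                 letter_pairs[cc] = i
--
--         if not spaced_double_letter and i > 1:
--             if string[i - 2] == string[i]:
--                 spaced_double_letter = True
--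
--         if double_letter_pair and spaced_double_letter:
--             return True
--
--     return False
-- ===== SOURCE B (Python) =====
-- def is_nice2(string: str) -> bool:
--     n = len(string)
--     has_pair = any(string[i:i + 2] in string[i + 2:] for i in range(n - 1))
--     has_spaced = any(string[i] == string[i + 2] for i in range(n - 2))
--     return has_pair and has_spaced
-- ===== Notes on version B (the rewrite author's own statement) =====
-- stated objective: simpler
-- what changed: Replaces the fused stateful scan with its first-occurrence dict and two flags by two independent one-line checks: a substring search of the suffix two positions later for the non-overlapping pair rule, plus a direct index comparison for the spaced-repeat rule, combined by conjunction.
import Mathlib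
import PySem

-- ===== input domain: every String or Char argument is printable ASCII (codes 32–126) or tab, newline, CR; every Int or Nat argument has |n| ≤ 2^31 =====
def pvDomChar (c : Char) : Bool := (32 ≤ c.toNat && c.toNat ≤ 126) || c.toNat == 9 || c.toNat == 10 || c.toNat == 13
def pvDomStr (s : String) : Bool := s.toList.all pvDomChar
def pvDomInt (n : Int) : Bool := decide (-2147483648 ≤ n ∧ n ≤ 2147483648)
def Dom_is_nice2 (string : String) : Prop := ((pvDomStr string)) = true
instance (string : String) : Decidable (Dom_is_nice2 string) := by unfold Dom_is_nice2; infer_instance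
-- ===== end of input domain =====

-- B replaces A's single fused dict-tracking pass by two independent one-line checks
-- (suffix substring search for the pair rule, index comparison for the spaced-repeat rule): simpler.

-- ===== PORT A =====
-- A's `for i in range(len(string))` loop with early return, transliterated as index
-- recursion over the same state (two flags + the first-occurrence dict `letter_pairs`).
def isNice2Loop (l : List Char) (i : Nat) (spaced double : Bool)
    (pairs : PySem.Dict (List Char) Int) : Bool :=
  if h : i < l.length then
    -- if not double_letter_pair and i > 0:
    let p : Bool × PySem.Dict (List Char) Int :=
      if !double && decide (0 < i) then
        let cc := PySem.Chars.slice l (some ((i : Int) - 1)) (some ((i : Int) + 1))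
        match pairs.get? cc with       -- `cc in letter_pairs` + `letter_pairs[cc]`
        | some v => (if v ≠ (i : Int) - 1 then true else double, pairs)
        | none => (double, pairs.insert cc (i : Int))
      else (double, pairs)
    -- if not spaced_double_letter and i > 1:
    let spaced' : Bool :=
      if !spaced && decide (1 < i) then
        -- string[i-2] == string[i]; both indices are nonnegative and in range here
        if PySem.List.pyGetD l ((i : Int) - 2) 'a' = PySem.List.pyGetD l (i : Int) 'a'
        then true else spaced
      else spaced
    if p.1 && spaced' then true else isNice2Loop l (i + 1) spaced' p.1 p.2
  else false
termination_by l.length - i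

def is_nice2 (string : String) : Bool :=
  isNice2Loop string.toList 0 false false PySem.Dict.empty

-- ===== PORT B =====
-- has_pair = any(string[i:i+2] in string[i+2:] for i in range(n-1))
-- has_spaced = any(string[i] == string[i+2] for i in range(n-2))
def is_nice2_alt (string : String) : Bool :=
  let l := string.toList
  let n := l.length
  let hasPair := (PySem.List.pyRange 0 ((n : Int) - 1) 1).any fun i =>
    PySem.Chars.isIn (PySem.Chars.slice l (some i) (some (i + 2)))
      (PySem.Chars.slice l (some (i + 2)) none)
  let hasSpaced := (PySem.List.pyRange 0 ((n : Int) - 2) 1).any fun i =>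
    PySem.List.pyGetD l i 'a' == PySem.List.pyGetD l (i + 2) 'a'
  hasPair && hasSpaced

-- ===== PRECONDITION & SPEC =====
def Spec_is_nice2 (string : String) (out : Bool) : Prop := out = is_nice2_alt string
instance (string : String) (out : Bool) : Decidable (Spec_is_nice2 string out) := by unfold Spec_is_nice2; infer_instance

-- ===== CLAIM (what is proved, stated in full; the proofs are below) =====
def Claim_equal_is_nice2 : Prop := ∀ (string : String), Dom_is_nice2 string → Spec_is_nice2 string (is_nice2 string)

-- ===== LEMMAS AND PROOFS =====

-- the pair of characters ending at index e (i.e. starting at e-1), as the dict key A stores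
def pairEnd (l : List Char) (e : Nat) : List Char := [l.getD (e - 1) 'a', l.getD e 'a']

-- "some pair of adjacent letters appears twice without overlap, both occurrences ending before index i"
abbrev DoubleUpTo (l : List Char) (i : Nat) : Prop :=
  ∃ e2 : Nat, e2 < i ∧ ∃ e1 : Nat, e1 < e2 ∧ 1 ≤ e1 ∧ e1 + 2 ≤ e2 ∧ pairEnd l e1 = pairEnd l e2

-- "some letter repeats with exactly one letter between, within l[0:i]"
abbrev SpacedUpTo (l : List Char) (i : Nat) : Prop :=
  ∃ j : Nat, j < i ∧ j + 2 < i ∧ l.getD j 'a' = l.getD (j + 2) 'a'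

-- the dict maps each pair to the index at which it FIRST appeared (A stores the loop index i, the end index)
def PairsInv (l : List Char) (i : Nat) (pairs : PySem.Dict (List Char) Int) : Prop :=
  ∀ cc v, pairs.get? cc = some v ↔
    ∃ e : Nat, v = (e : Int) ∧ 1 ≤ e ∧ e < i ∧ pairEnd l e = cc ∧
      ∀ e', 1 ≤ e' → e' < e → pairEnd l e' ≠ cc

lemma take_two_drop (l : List Char) (k : Nat) (h : k + 1 < l.length) :
    (l.drop k).take 2 = [l.getD k 'a', l.getD (k + 1) 'a'] := by
  rw [List.drop_eq_getElem_cons (show k < l.length by omega),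
    List.drop_eq_getElem_cons (show k + 1 < l.length by omega)]
  simp only [List.take_succ_cons, List.take_zero]
  rw [List.getD_eq_getElem?_getD, List.getD_eq_getElem?_getD,
    List.getElem?_eq_getElem (show k < l.length by omega),
    List.getElem?_eq_getElem (show k + 1 < l.length by omega)]
  simp

lemma slice_pairEnd (l : List Char) (i : Nat) (h1 : 1 ≤ i) (h2 : i < l.length) :
    PySem.Chars.slice l (some ((i : Int) - 1)) (some ((i : Int) + 1)) = pairEnd l i := by
  have e1 : (i : Int) - 1 = ((i - 1 : Nat) : Int) := by omega
  have e2 : (i : Int) + 1 = ((i + 1 : Nat) : Int) := by omega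
  rw [PySem.Chars.slice_eq_listSlice, e1, e2, PySem.List.slice_natCast]
  have e3 : i + 1 - (i - 1) = 2 := by omega
  rw [e3, take_two_drop l (i - 1) (by omega)]
  unfold pairEnd
  have e4 : i - 1 + 1 = i := by omega
  rw [e4]

lemma doubleUpTo_iff (l : List Char) (i : Nat) :
    DoubleUpTo l i ↔
      ∃ e1 e2 : Nat, 1 ≤ e1 ∧ e1 + 2 ≤ e2 ∧ e2 < i ∧ pairEnd l e1 = pairEnd l e2 := by
  constructor
  · rintro ⟨e2, hlt, e1, -, h1, h12, heq⟩
    exact ⟨e1, e2, h1, h12, hlt, heq⟩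
  · rintro ⟨e1, e2, u1, u2, u3, u4⟩
    exact ⟨e2, u3, e1, by omega, u1, u2, u4⟩

lemma spacedUpTo_iff (l : List Char) (i : Nat) :
    SpacedUpTo l i ↔ ∃ j : Nat, j + 2 < i ∧ l.getD j 'a' = l.getD (j + 2) 'a' := by
  constructor
  · rintro ⟨j, -, h2, h3⟩
    exact ⟨j, h2, h3⟩
  · rintro ⟨j, h2, h3⟩
    exact ⟨j, by omega, h2, h3⟩

lemma spaced_step (l : List Char) (i : Nat) :
    SpacedUpTo l (i + 1) ↔ SpacedUpTo l i ∨ (1 < i ∧ l.getD (i - 2) 'a' = l.getD i 'a') := by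
  rw [spacedUpTo_iff l (i + 1), spacedUpTo_iff l i]
  constructor
  · rintro ⟨j, hj, he⟩
    by_cases hji : j + 2 < i
    · exact Or.inl ⟨j, hji, he⟩
    · have hij : i = j + 2 := by omega
      subst hij
      exact Or.inr ⟨by omega, by rw [show j + 2 - 2 = j from by omega]; exact he⟩
  · rintro (⟨j, hj, he⟩ | ⟨hi2, he⟩)
    · exact ⟨j, by omega, he⟩
    · exact ⟨i - 2, by omega, by rw [show i - 2 + 2 = i from by omega]; exact he⟩

lemma double_succ_zero (l : List Char) : DoubleUpTo l 1 ↔ DoubleUpTo l 0 := by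
  constructor <;> rintro ⟨b, hb, a, ha, h1, h2, -⟩ <;> omega

lemma pairsInv_none (l : List Char) (i : Nat) (pairs : PySem.Dict (List Char) Int)
    (hp : PairsInv l i pairs) (cc : List Char) (hget : pairs.get? cc = none) :
    ∀ e, 1 ≤ e → e < i → pairEnd l e ≠ cc := by
  intro e he1 hei hpe
  have hex : ∃ e, 1 ≤ e ∧ e < i ∧ pairEnd l e = cc := ⟨e, he1, hei, hpe⟩
  have hfind := Nat.find_spec hex
  have hmin := fun m hm => Nat.find_min hex (m := m) hm
  have : pairs.get? cc = some ((Nat.find hex : Nat) : Int) := by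
    refine (hp cc _).mpr ⟨Nat.find hex, rfl, hfind.1, hfind.2.1, hfind.2.2, ?_⟩
    intro e' h1 h2 h3
    exact hmin e' (by omega) ⟨h1, by omega, h3⟩
  rw [hget] at this
  simp at this

-- main loop invariant: the loop computes "non-overlapping pair exists AND spaced repeat exists"
lemma loopA_eq (l : List Char) (fuel : Nat) :
    ∀ (i : Nat) (spaced double : Bool) (pairs : PySem.Dict (List Char) Int),
      l.length - i = fuel → i ≤ l.length →
      spaced = decide (SpacedUpTo l i) →
      double = decide (DoubleUpTo l i) →
      ¬(double = true ∧ spaced = true) →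
      (double = false → PairsInv l i pairs) →
      isNice2Loop l i spaced double pairs =
        (decide (DoubleUpTo l l.length) && decide (SpacedUpTo l l.length)) := by
  induction fuel with
  | zero =>
    intro i spaced double pairs hf hi hsp hdb hnb hp
    have hie : i = l.length := by omega
    subst hie
    rw [isNice2Loop, dif_neg (by omega)]
    rw [← hsp, ← hdb]
    cases double <;> cases spaced <;> simp_all
  | succ m ih =>
    intro i spaced double pairs hf hi hsp hdb hnb hp
    have hlt : i < l.length := by omega
    rw [isNice2Loop, dif_pos hlt]
    dsimp only
    -- the spaced' update equals the prefix-existential at i+1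
    have hsp' : (if (!spaced && decide (1 < i)) = true then
        if PySem.List.pyGetD l ((i : Int) - 2) 'a' = PySem.List.pyGetD l ((i : Nat) : Int) 'a'
        then true else spaced
      else spaced) = decide (SpacedUpTo l (i + 1)) := by
      cases hsv : spaced with
      | true =>
        have hS : SpacedUpTo l i := of_decide_eq_true (hsp.symm.trans hsv)
        rw [if_neg (by simp)]
        exact (decide_eq_true ((spaced_step l i).mpr (Or.inl hS))).symm
      | false =>
        have hS : ¬ SpacedUpTo l i := of_decide_eq_false (hsp.symm.trans hsv)
        by_cases hg : 1 < i
        · have ei2 : (i : Int) - 2 = ((i - 2 : Nat) : Int) := by omega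
          rw [if_pos (by simp [hg]), ei2, PySem.List.pyGetD_natCast, PySem.List.pyGetD_natCast]
          by_cases hce : l.getD (i - 2) 'a' = l.getD i 'a'
          · rw [if_pos hce]
            exact (decide_eq_true ((spaced_step l i).mpr (Or.inr ⟨hg, hce⟩))).symm
          · rw [if_neg hce]
            refine (decide_eq_false ?_).symm
            rw [spaced_step l i]
            rintro (h | ⟨-, h⟩)
            · exact hS h
            · exact hce h
        · rw [if_neg (by simp [hg])]
          refine (decide_eq_false ?_).symm
          rw [spaced_step l i]
          rintro (h | ⟨h, -⟩)
          · exact hS h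
          · omega
    rw [hsp']
    by_cases hi0 : i = 0
    · -- first iteration: both guards are off, nothing changes
      subst hi0
      rw [if_neg (show ¬(!double && decide ((0 : Nat) < 0)) = true by cases double <;> decide)]
      dsimp only
      have hs01 : decide (SpacedUpTo l 1) = decide (SpacedUpTo l 0) := by
        rw [decide_eq_decide, spaced_step l 0]
        constructor
        · rintro (h | ⟨h, -⟩)
          · exact h
          · omega
        · exact Or.inl
      have hdb1 : double = decide (DoubleUpTo l 1) := by
        rw [hdb, decide_eq_decide]
        exact (double_succ_zero l).symm
      have hnb1 : (double && decide (SpacedUpTo l 1)) = false := by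
        rw [hs01, ← hsp]
        cases hdv : double with
        | false => simp
        | true =>
          cases hsv : spaced with
          | false => simp
          | true => exact absurd ⟨hdv, hsv⟩ hnb
      rw [hnb1, if_neg (show ¬(false = true) by decide)]
      refine ih 1 _ double pairs (by omega) (by omega) rfl hdb1 ?_ ?_
      · intro hcon
        rw [hcon.1, hcon.2] at hnb1
        simp at hnb1
      · intro hdf cc v
        rw [hp hdf cc v]
        constructor
        · rintro ⟨e, hv, u1, u2, u3, u4⟩
          omega
        · rintro ⟨e, hv, u1, u2, u3, u4⟩
          omega
    · -- i ≥ 1 : the pair-dict update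
      have h1i : 1 ≤ i := by omega
      rw [slice_pairEnd l i h1i hlt]
      obtain ⟨db', ps', hpeq, hdb', hpi'⟩ :
          ∃ d p', (if (!double && decide (0 < i)) = true then
              match pairs.get? (pairEnd l i) with
              | some v => (if v ≠ (i : Int) - 1 then true else double, pairs)
              | none => (double, pairs.insert (pairEnd l i) ((i : Nat) : Int))
            else (double, pairs)) = (d, p') ∧
            d = decide (DoubleUpTo l (i + 1)) ∧
            (d = false → PairsInv l (i + 1) p') := by
        cases hdv : double with
        | true =>
          have hD : DoubleUpTo l i := of_decide_eq_true (hdb.symm.trans hdv)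
          rw [if_neg (by simp)]
          refine ⟨true, pairs, rfl, ?_, by simp⟩
          obtain ⟨a, b, u1, u2, u3, u4⟩ := (doubleUpTo_iff l i).mp hD
          exact (decide_eq_true ((doubleUpTo_iff l (i + 1)).mpr ⟨a, b, u1, u2, by omega, u4⟩)).symm
        | false =>
          have hD : ¬ DoubleUpTo l i := of_decide_eq_false (hdb.symm.trans hdv)
          have hpinv := hp hdv
          rw [if_pos (by simp; omega)]
          cases hget : pairs.get? (pairEnd l i) with
          | none =>
            have hno := pairsInv_none l i pairs hpinv (pairEnd l i) hget
            have hnD : ¬ DoubleUpTo l (i + 1) := by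
              intro hDD
              obtain ⟨a, b, u1, u2, u3, u4⟩ := (doubleUpTo_iff l (i + 1)).mp hDD
              by_cases hbi : b < i
              · exact hD ((doubleUpTo_iff l i).mpr ⟨a, b, u1, u2, hbi, u4⟩)
              · have hbe : b = i := by omega
                subst hbe
                exact hno a u1 (by omega) u4
            refine ⟨false, pairs.insert (pairEnd l i) ((i : Nat) : Int), rfl,
              (decide_eq_false hnD).symm, ?_⟩
            intro _ cc v
            by_cases hcc : cc = pairEnd l i
            · subst hcc
              rw [PySem.Dict.get?_insert_self]
              constructor
              · intro hsome
                obtain rfl : ((i : Nat) : Int) = v := by injection hsome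
                exact ⟨i, rfl, h1i, by omega, rfl, fun e' u1 u2 _ => hno e' u1 u2 (by assumption)⟩
              · rintro ⟨e, rfl, u1, u2, u3, -⟩
                have hei' : e = i := by
                  by_contra hne
                  exact hno e u1 (by omega) u3
                subst hei'
                rfl
            · rw [PySem.Dict.get?_insert_of_ne pairs _ hcc, hpinv cc v]
              constructor
              · rintro ⟨e, rfl, u1, u2, u3, u4⟩
                exact ⟨e, rfl, u1, by omega, u3, u4⟩
              · rintro ⟨e, rfl, u1, u2, u3, u4⟩
                refine ⟨e, rfl, u1, ?_, u3, u4⟩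
                by_contra hne
                have hei' : e = i := by omega
                subst hei'
                exact hcc u3.symm
          | some v =>
            obtain ⟨e, hv, he1, hei, hpe, hmin⟩ := (hpinv (pairEnd l i) v).mp hget
            by_cases hvi : v ≠ (i : Int) - 1
            · have heni : e + 2 ≤ i := by
                subst hv
                omega
              have hDn : DoubleUpTo l (i + 1) :=
                (doubleUpTo_iff l (i + 1)).mpr ⟨e, i, he1, heni, by omega, hpe⟩
              exact ⟨true, pairs, by dsimp only; rw [if_pos hvi], (decide_eq_true hDn).symm, by simp⟩
            · have hvv : v = (i : Int) - 1 := not_not.mp hvi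
              have hee : e = i - 1 := by
                subst hv
                omega
              subst hee
              have hnD : ¬ DoubleUpTo l (i + 1) := by
                intro hDD
                obtain ⟨a, b, u1, u2, u3, u4⟩ := (doubleUpTo_iff l (i + 1)).mp hDD
                by_cases hbi : b < i
                · exact hD ((doubleUpTo_iff l i).mpr ⟨a, b, u1, u2, hbi, u4⟩)
                · have hbe : b = i := by omega
                  subst hbe
                  exact hmin a u1 (by omega) u4
              refine ⟨false, pairs, by dsimp only; rw [if_neg hvi], (decide_eq_false hnD).symm, ?_⟩
              intro _ cc v'
              rw [hpinv cc v']
              constructor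
              · rintro ⟨e', rfl, u1, u2, u3, u4⟩
                exact ⟨e', rfl, u1, by omega, u3, u4⟩
              · rintro ⟨e', rfl, u1, u2, u3, u4⟩
                refine ⟨e', rfl, u1, ?_, u3, u4⟩
                by_contra hne
                have he'i : e' = i := by omega
                rw [he'i] at u3
                exact u4 (i - 1) he1 (by omega) (hpe.trans u3)
      rw [hpeq]
      dsimp only
      rw [hdb']
      by_cases hboth : DoubleUpTo l (i + 1) ∧ SpacedUpTo l (i + 1)
      · rw [if_pos (by simp [hboth.1, hboth.2])]
        have hDn : DoubleUpTo l l.length := by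
          obtain ⟨a, b, u1, u2, u3, u4⟩ := (doubleUpTo_iff l (i + 1)).mp hboth.1
          exact (doubleUpTo_iff l l.length).mpr ⟨a, b, u1, u2, by omega, u4⟩
        have hSn : SpacedUpTo l l.length := by
          obtain ⟨j, u0, u1, u2⟩ := hboth.2
          exact ⟨j, by omega, by omega, u2⟩
        simp [hDn, hSn]
      · rw [if_neg (by simp only [decide_eq_true_eq, Bool.and_eq_true]; exact hboth)]
        exact ih (i + 1) _ _ ps' (by omega) (by omega) rfl rfl
          (by simp only [decide_eq_true_eq]; exact hboth)
          (fun h => hpi' (hdb'.trans h))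

lemma pair_prefix_drop (l : List Char) (a b : Char) (m : Nat) :
    [a, b] <+: l.drop m ↔ m + 1 < l.length ∧ l.getD m 'a' = a ∧ l.getD (m + 1) 'a' = b := by
  have hlen : [a, b].length = 2 := rfl
  constructor
  · intro h
    have hl : 2 ≤ (l.drop m).length := by simpa using h.length_le
    have hm : m + 1 < l.length := by simp at hl; omega
    have ht := List.prefix_iff_eq_take.mp h
    rw [hlen, take_two_drop l m hm] at ht
    injection ht with h1 ht2
    injection ht2 with h2 _
    exact ⟨hm, h1.symm, h2.symm⟩
  · rintro ⟨hm, ha, hb⟩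
    rw [List.prefix_iff_eq_take, hlen, take_two_drop l m hm, ha, hb]

lemma hasSpaced_eq (l : List Char) :
    ((PySem.List.pyRange 0 ((l.length : Int) - 2) 1).any fun i =>
      PySem.List.pyGetD l i 'a' == PySem.List.pyGetD l (i + 2) 'a')
      = decide (SpacedUpTo l l.length) := by
  rw [Bool.eq_iff_iff]
  simp only [List.any_eq_true, PySem.List.mem_pyRange_one, beq_iff_eq, decide_eq_true_eq]
  rw [spacedUpTo_iff l l.length]
  constructor
  · rintro ⟨i, ⟨h0, hi⟩, heq⟩
    obtain ⟨j, rfl⟩ : ∃ j : Nat, i = (j : Int) := ⟨i.toNat, (Int.toNat_of_nonneg h0).symm⟩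
    have e2 : (j : Int) + 2 = ((j + 2 : Nat) : Int) := by omega
    rw [e2, PySem.List.pyGetD_natCast, PySem.List.pyGetD_natCast] at heq
    exact ⟨j, by omega, heq⟩
  · rintro ⟨j, hj, heq⟩
    refine ⟨(j : Int), ⟨by omega, by omega⟩, ?_⟩
    have e2 : (j : Int) + 2 = ((j + 2 : Nat) : Int) := by omega
    rw [e2, PySem.List.pyGetD_natCast, PySem.List.pyGetD_natCast]
    exact heq

lemma hasPair_eq (l : List Char) :
    ((PySem.List.pyRange 0 ((l.length : Int) - 1) 1).any fun i =>
      PySem.Chars.isIn (PySem.Chars.slice l (some i) (some (i + 2)))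
        (PySem.Chars.slice l (some (i + 2)) none))
      = decide (DoubleUpTo l l.length) := by
  rw [Bool.eq_iff_iff]
  simp only [List.any_eq_true, PySem.List.mem_pyRange_one, decide_eq_true_eq,
    PySem.Chars.slice_eq_listSlice]
  rw [doubleUpTo_iff l l.length]
  constructor
  · rintro ⟨i, ⟨h0, hi⟩, hin⟩
    obtain ⟨j, rfl⟩ : ∃ j : Nat, i = (j : Int) := ⟨i.toNat, (Int.toNat_of_nonneg h0).symm⟩
    have e2 : (j : Int) + 2 = ((j + 2 : Nat) : Int) := by omega
    rw [e2, PySem.List.slice_natCast, show j + 2 - j = 2 from by omega,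
      take_two_drop l j (by omega), PySem.List.slice_from_natCast] at hin
    obtain ⟨k, hk⟩ := (PySem.Chars.exists_prefix_drop_iff_isIn _ _).mpr hin
    rw [List.drop_drop, show j + 2 + k = k + j + 2 from by omega, pair_prefix_drop] at hk
    obtain ⟨hm, ha, hb⟩ := hk
    refine ⟨j + 1, k + j + 2 + 1, by omega, by omega, by omega, ?_⟩
    unfold pairEnd
    rw [show j + 1 - 1 = j from by omega, show k + j + 2 + 1 - 1 = k + j + 2 from by omega,
      ha, hb]
  · rintro ⟨e1, e2, he1, he12, he2, hpe⟩
    unfold pairEnd at hpe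
    injection hpe with hp1 hp2
    injection hp2 with hp2 _
    refine ⟨((e1 - 1 : Nat) : Int), ⟨by omega, by omega⟩, ?_⟩
    have c2 : ((e1 - 1 : Nat) : Int) + 2 = ((e1 + 1 : Nat) : Int) := by omega
    rw [c2, PySem.List.slice_natCast, show e1 + 1 - (e1 - 1) = 2 from by omega,
      take_two_drop l (e1 - 1) (by omega), PySem.List.slice_from_natCast]
    apply (PySem.Chars.exists_prefix_drop_iff_isIn _ _).mp
    refine ⟨e2 - 1 - (e1 + 1), ?_⟩
    rw [List.drop_drop, show e1 + 1 + (e2 - 1 - (e1 + 1)) = e2 - 1 from by omega,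
      pair_prefix_drop, show e1 - 1 + 1 = e1 from by omega,
      show e2 - 1 + 1 = e2 from by omega]
    exact ⟨by omega, hp1.symm, hp2.symm⟩

lemma altB_eq (s : String) :
    is_nice2_alt s =
      (decide (DoubleUpTo s.toList s.toList.length) && decide (SpacedUpTo s.toList s.toList.length)) := by
  unfold is_nice2_alt
  dsimp only
  rw [hasPair_eq, hasSpaced_eq]

-- ===== VERDICT (by name: the statement is the Claim_ definition above) =====
theorem is_nice2_spec : Claim_equal_is_nice2 := by
  intro s _
  unfold Spec_is_nice2 is_nice2
  rw [altB_eq]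
  refine loopA_eq s.toList s.toList.length 0 false false PySem.Dict.empty rfl (by omega) ?_ ?_ ?_ ?_
  · exact (decide_eq_false (by rintro ⟨j, hj, -⟩; omega)).symm
  · exact (decide_eq_false (by rintro ⟨e2, h3, -⟩; omega)).symm
  · simp
  · intro _ cc v
    constructor
    · intro h
      exact absurd h (by simp [PySem.Dict.get?_empty])
    · rintro ⟨e, -, he1, he2, -⟩
      omega
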